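-- pv_equiv track=rewrite | github.com/Prathamesh-Udoshi/intelligent-adaptive-mock | src/utils/drift_detector.py | format_drift_summary
-- ===== SOURCE A (Python) =====
-- from typing import Dict, List, Any, Optional, Tuple
--
-- def format_drift_summary(drift_issues: List[Dict[str, Any]]) -> str:
--     """
--     Creates a human-readable summary of drift issues.
--     """
--     if not drift_issues:
--         return "No drift detected"
--
--     high_severity = [i for i in drift_issues if i.get("severity") == "high"]
--     medium_severity = [i for i in drift_issues if i.get("severity") == "medium"]
--     low_severity = [i for i in drift_issues if i.get("severity") == "low"]
--
--     parts = []
--     if high_severity: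
--         parts.append(f"{len(high_severity)} critical issue(s)")
--     if medium_severity:
--         parts.append(f"{len(medium_severity)} warning(s)")
--     if low_severity:
--         parts.append(f"{len(low_severity)} minor change(s)")
--
--     return ", ".join(parts)
-- ===== SOURCE B (Python) =====
-- def format_drift_summary(drift_issues):
--     """
--     Creates a human-readable summary of drift issues.
--     """
--     if not drift_issues:
--         return "No drift detected"
--
--     counts = {}
--     for i in drift_issues:
--         s = i.get("severity")
--         counts[s] = counts.get(s, 0) + 1
--
--     parts = []
--     for n, label in ((counts.get("high", 0), "critical issue(s)"),
--                      (counts.get("medium", 0), "warning(s)"),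
--                      (counts.get("low", 0), "minor change(s)")):
--         if n:
--             parts.append(f"{n} {label}")
--     return ", ".join(parts)
-- ===== Notes on version B (the rewrite author's own statement) =====
-- stated objective: simpler
-- what changed: Replaces three filtering passes over the issue list with one counting pass into a dict plus a fixed emit loop over the three known severities.
import Mathlib
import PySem

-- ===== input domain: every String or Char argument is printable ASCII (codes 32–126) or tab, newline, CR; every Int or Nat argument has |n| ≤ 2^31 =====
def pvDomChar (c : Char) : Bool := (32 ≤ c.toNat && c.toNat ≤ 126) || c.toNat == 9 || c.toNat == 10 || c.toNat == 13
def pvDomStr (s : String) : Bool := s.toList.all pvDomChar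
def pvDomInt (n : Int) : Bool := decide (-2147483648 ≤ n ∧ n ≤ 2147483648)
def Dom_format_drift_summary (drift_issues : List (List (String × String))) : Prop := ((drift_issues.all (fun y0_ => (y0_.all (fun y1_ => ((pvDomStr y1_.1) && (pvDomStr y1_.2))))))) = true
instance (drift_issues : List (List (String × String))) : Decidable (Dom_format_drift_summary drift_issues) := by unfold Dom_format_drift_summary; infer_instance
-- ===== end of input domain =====

-- ===== PORT A =====
-- B replaces A's three filtering passes with one counting pass into a dict; return-value equivalence only.
-- i.get("severity") on the assoc-list dict: first match (unique keys in a Python dict)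
def sevOf (i : List (String × String)) : Option String :=
  (i.find? (fun p => p.1 == "severity")).map Prod.snd

def format_drift_summary (drift_issues : List (List (String × String))) : String :=
  if drift_issues.isEmpty then "No drift detected"
  else
    let high_severity := drift_issues.filter (fun i => sevOf i == some "high")
    let medium_severity := drift_issues.filter (fun i => sevOf i == some "medium")
    let low_severity := drift_issues.filter (fun i => sevOf i == some "low")
    let parts : List String := []
    let parts := if high_severity.isEmpty then parts
      else parts ++ [PySem.Int.toStr (high_severity.length : Int) ++ " critical issue(s)"]
    let parts := if medium_severity.isEmpty then parts
      else parts ++ [PySem.Int.toStr (medium_severity.length : Int) ++ " warning(s)"]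
    let parts := if low_severity.isEmpty then parts
      else parts ++ [PySem.Int.toStr (low_severity.length : Int) ++ " minor change(s)"]
    PySem.Str.join ", " parts

-- ===== PORT B =====
def format_drift_summary_alt (drift_issues : List (List (String × String))) : String :=
  if drift_issues.isEmpty then "No drift detected"
  else
    -- counts[s] = counts.get(s, 0) + 1 over one pass
    let counts : PySem.Dict (Option String) Int := drift_issues.foldl
      (fun d i =>
        let s := sevOf i
        PySem.Dict.insert d s (PySem.Dict.getD d s 0 + 1))
      PySem.Dict.empty
    let emit : List (Int × String) :=
      [(PySem.Dict.getD counts (some "high") 0, "critical issue(s)"),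
       (PySem.Dict.getD counts (some "medium") 0, "warning(s)"),
       (PySem.Dict.getD counts (some "low") 0, "minor change(s)")]
    let parts := emit.foldl
      (fun ps p => if p.1 ≠ 0 then ps ++ [PySem.Int.toStr p.1 ++ " " ++ p.2] else ps) []
    PySem.Str.join ", " parts

-- ===== PRECONDITION & SPEC =====
def Spec_format_drift_summary (drift_issues : List (List (String × String))) (out : String) : Prop := out = format_drift_summary_alt drift_issues
instance (drift_issues : List (List (String × String))) (out : String) : Decidable (Spec_format_drift_summary drift_issues out) := by unfold Spec_format_drift_summary; infer_instance

-- ===== CLAIM (what is proved, stated in full; the proofs are below) =====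
def Claim_equal_format_drift_summary : Prop := ∀ (drift_issues : List (List (String × String))), Dom_format_drift_summary drift_issues → Spec_format_drift_summary drift_issues (format_drift_summary drift_issues)

-- ===== LEMMAS AND PROOFS =====
-- the count accumulated for a severity key equals the length of A's filter for that severity
theorem fds_count_aux (xs : List (List (String × String))) (v : String) :
    (xs.map sevOf).count (some v) = (xs.filter (fun i => sevOf i == some v)).length := by
  induction xs with
  | nil => rfl
  | cons a l ih =>
    simp only [List.map_cons, List.count_cons, List.filter_cons]
    by_cases h : sevOf a == some v
    · simp [h, ih]
    · simp [h, ih]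

theorem fds_count_lemma (xs : List (List (String × String))) (v : String) :
    PySem.Dict.getD (xs.foldl
      (fun d i =>
        let s := sevOf i
        PySem.Dict.insert d s (PySem.Dict.getD d s 0 + 1))
      PySem.Dict.empty) (some v) 0
    = ((xs.filter (fun i => sevOf i == some v)).length : Int) := by
  have h := PySem.Dict.getD_foldl_insert_add_one
    (l := xs.map sevOf) (d := (PySem.Dict.empty : PySem.Dict (Option String) Int))
    (v := some v)
  rw [List.foldl_map] at h
  simp only [h, PySem.Dict.getD_empty, fds_count_aux, zero_add]

theorem fds_bridge {α : Type} (l : List α) : ((l.length : Int) = 0) ↔ l.isEmpty = true := by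
  cases l
  · simp
  · simp; omega

theorem fds_sp1 : (" " : String) ++ "critical issue(s)" = " critical issue(s)" := by decide
theorem fds_sp2 : (" " : String) ++ "warning(s)" = " warning(s)" := by decide
theorem fds_sp3 : (" " : String) ++ "minor change(s)" = " minor change(s)" := by decide

-- ===== VERDICT (by name: the statement is the Claim_ definition above) =====
theorem format_drift_summary_spec : Claim_equal_format_drift_summary := by
  intro xs _
  unfold Spec_format_drift_summary format_drift_summary format_drift_summary_alt
  by_cases he : xs.isEmpty
  · simp [he]
  · rw [Bool.not_eq_true] at he
    simp only [he, Bool.false_eq_true, if_false, fds_count_lemma,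
      List.foldl_cons, List.foldl_nil]
    by_cases h1 : (xs.filter (fun i => sevOf i == some "high")).isEmpty <;>
    by_cases h2 : (xs.filter (fun i => sevOf i == some "medium")).isEmpty <;>
    by_cases h3 : (xs.filter (fun i => sevOf i == some "low")).isEmpty
    all_goals (try rw [Bool.not_eq_true] at h1)
    all_goals (try rw [Bool.not_eq_true] at h2)
    all_goals (try rw [Bool.not_eq_true] at h3)
    all_goals
      simp only [ne_eq, fds_bridge, h1, h2, h3, Bool.false_eq_true, not_false_eq_true,
        not_true, if_true, if_false, List.nil_append, String.append_assoc,
        fds_sp1, fds_sp2, fds_sp3]
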